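-- pv_equiv track=rewrite | github.com/teng-si-yuan/learning_python | triangular_number/triangular_number_array.py | triangular_number_array
-- ===== SOURCE A (Python) =====
-- def triangular_number(x):
--     i = 1
--     y = 0
--     while i <= x:
--         y = y + i
--         i = i + 1
--     return(y)
--
-- def triangular_number_array(start):
--     i = triangular_number(start - 1) + 1
--     end = triangular_number(start)
--     arr = []
--     while i <= end:
--         arr.append(i)
--         i = i + 1
--     return arr
-- ===== SOURCE B (Python) =====
-- def triangular_number_array(start):
--     first = (start - 1) * start // 2 + 1
--     return list(range(first, first + start))
-- ===== Notes on version B (the rewrite author's own statement) =====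
-- stated objective: simpler
-- what changed: Replaced the two accumulation loops (summing to build both triangular numbers, then appending each element) with Gauss's closed form for the row's first element and a single range() materialisation.
import Mathlib
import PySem

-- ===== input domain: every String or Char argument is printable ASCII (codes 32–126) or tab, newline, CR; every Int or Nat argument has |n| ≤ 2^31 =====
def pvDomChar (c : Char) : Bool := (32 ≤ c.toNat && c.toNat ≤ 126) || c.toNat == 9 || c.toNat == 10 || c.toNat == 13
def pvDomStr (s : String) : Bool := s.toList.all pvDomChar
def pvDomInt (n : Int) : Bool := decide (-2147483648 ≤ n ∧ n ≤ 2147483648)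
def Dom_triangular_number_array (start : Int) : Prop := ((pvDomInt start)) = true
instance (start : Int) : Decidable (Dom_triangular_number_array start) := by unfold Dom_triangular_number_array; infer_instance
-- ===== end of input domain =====

-- B replaces A's two while-loops with Gauss's closed form for the row's first
-- element and a single range materialisation (objective: simpler).

-- ===== PORT A =====
-- while i <= x: y = y + i; i = i + 1
def tnLoop (i x y : Int) : Int :=
  if i ≤ x then tnLoop (i + 1) x (y + i) else y
termination_by (x + 1 - i).toNat
decreasing_by omega

def triangular_number (x : Int) : Int := tnLoop 1 x 0

-- while i <= end: arr.append(i); i = i + 1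
def arrLoop (i stop : Int) (arr : List Int) : List Int :=
  if i ≤ stop then arrLoop (i + 1) stop (arr ++ [i]) else arr
termination_by (stop + 1 - i).toNat
decreasing_by omega

def triangular_number_array (start : Int) : List Int :=
  arrLoop (triangular_number (start - 1) + 1) (triangular_number start) []

-- ===== PORT B =====
def triangular_number_array_alt (start : Int) : List Int :=
  let first := PySem.Int.floordiv ((start - 1) * start) 2 + 1
  PySem.List.pyRange first (first + start) 1

-- ===== PRECONDITION & SPEC =====
def Spec_triangular_number_array (start : Int) (out : List Int) : Prop := out = triangular_number_array_alt start
instance (start : Int) (out : List Int) : Decidable (Spec_triangular_number_array start out) := by unfold Spec_triangular_number_array; infer_instance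

-- ===== CLAIM (what is proved, stated in full; the proofs are below) =====
def Claim_equal_triangular_number_array : Prop := ∀ (start : Int), Dom_triangular_number_array start → Spec_triangular_number_array start (triangular_number_array start)

-- ===== LEMMAS AND PROOFS =====

-- ===== VERDICT (by name: the statement is the Claim_ definition above) =====
-- loop characterisations
theorem tnLoop_eq (i x y : Int) : tnLoop i x y = y + (PySem.List.pyRange i (x + 1) 1).sum := by
  fun_induction tnLoop i x y with
  | case1 i y h ih =>
    rw [ih, PySem.List.pyRange_one_cons (by omega : i < x + 1)]
    simp only [List.sum_cons]
    ring
  | case2 i y h =>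
    rw [PySem.List.pyRange_one_eq_nil (by omega)]
    simp

theorem arrLoop_eq (i stop : Int) (arr : List Int) :
    arrLoop i stop arr = arr ++ PySem.List.pyRange i (stop + 1) 1 := by
  fun_induction arrLoop i stop arr with
  | case1 i arr h ih =>
    rw [ih, PySem.List.pyRange_one_cons (by omega : i < stop + 1)]
    simp
  | case2 i arr h =>
    rw [PySem.List.pyRange_one_eq_nil (by omega)]
    simp

theorem sum_range_gauss (n : Nat) :
    (PySem.List.pyRange 1 (1 + (n : Int)) 1).sum * 2 = (n : Int) * ((n : Int) + 1) := by
  induction n with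
  | zero => rw [PySem.List.pyRange_one_eq_nil (by omega)]; simp
  | succ m ih =>
    have h1 : (1 : Int) + ((m + 1 : Nat) : Int) = (1 + (m : Int)) + 1 := by push_cast; ring
    rw [h1, PySem.List.pyRange_one_succ_right (by omega)]
    simp only [List.sum_append, List.sum_cons, List.sum_nil]
    push_cast
    linear_combination ih

theorem tn_closed (x : Int) : triangular_number x * 2 = (x.toNat : Int) * ((x.toNat : Int) + 1) := by
  have h := tnLoop_eq 1 x 0
  by_cases hx : 0 ≤ x
  · have hc : x + 1 = 1 + (x.toNat : Int) := by omega
    rw [hc] at h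
    simp only [triangular_number, h, zero_add]
    exact sum_range_gauss x.toNat
  · have hc : (x.toNat : Int) = 0 := by omega
    rw [PySem.List.pyRange_one_eq_nil (by omega)] at h
    simp only [triangular_number, h, hc]
    simp

theorem triangular_number_array_spec : Claim_equal_triangular_number_array := by
  intro start _
  unfold Spec_triangular_number_array triangular_number_array triangular_number_array_alt
  rw [arrLoop_eq]
  simp only [List.nil_append]
  have h1 := tn_closed (start - 1)
  have h2 := tn_closed start
  by_cases hs : 1 ≤ start
  · -- nonempty row: the closed form matches both endpoints
    have hc1 : ((start - 1).toNat : Int) = start - 1 := by omega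
    have hc2 : ((start).toNat : Int) = start := by omega
    rw [hc1] at h1; rw [hc2] at h2
    have hfd : PySem.Int.floordiv ((start - 1) * start) 2 = triangular_number (start - 1) := by
      have he : (start - 1) * start = triangular_number (start - 1) * 2 := by linear_combination -h1
      rw [he, mul_comm, PySem.Int.floordiv_eq_ediv_of_pos (by omega)]
      exact Int.mul_ediv_cancel_left _ (by omega)
    have hend : triangular_number start = triangular_number (start - 1) + start := by
      have h3 : triangular_number start * 2 = (triangular_number (start - 1) + start) * 2 := by
        linear_combination h2 - h1
      omega
    rw [hfd, hend]
    have he2 : triangular_number (start - 1) + start + 1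
        = triangular_number (start - 1) + 1 + start := by ring
    rw [he2]
  · -- start <= 0: both loops produce the empty list
    have e1 : triangular_number (start - 1) = 0 := by
      have hc : ((start - 1).toNat : Int) = 0 := by omega
      rw [hc] at h1; omega
    have e2 : triangular_number start = 0 := by
      have hc : ((start).toNat : Int) = 0 := by omega
      rw [hc] at h2; omega
    rw [e1, e2, PySem.List.pyRange_one_eq_nil (by omega),
        PySem.List.pyRange_one_eq_nil (by omega)]
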